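-- pv_equiv track=rewrite | github.com/maroro0220/PythonStudy | Programmers/KakaoInternsample_4.py | solution
-- ===== SOURCE A (Python) =====
-- def solution(k, room_number):
--     answer = []
--     m=dict()
--     for i in room_number:
--         if( i not in m.keys()):
--             answer.append(i)
--             m[i]=i+1;
--
--         else:
--             b=[]
--             j=m[i]
--             while j in m:
--                 b.append(j)
--                 j=m[j]
--             for bb in b:# This is important. if input is [1,1,1,3,1,1,1], result after this function is m[3] = 6. So it sholud be update
--                 m[bb]=j+1
--             m[j]=j+1
--             answer.append(j)
--
--     return answer
-- ===== SOURCE B (Python) =====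
-- def solution(k, room_number):
--     # plain occupied-set with an upward linear scan: no successor map,
--     # no path compression, no relabelling -- just "first free room >= r".
--     occupied = set()
--     out = []
--     for r in room_number:
--         room = r
--         while room in occupied:
--             room += 1
--         occupied.add(room)
--         out.append(room)
--     return out
-- ===== Notes on version B (the rewrite author's own statement) =====
-- stated objective: simpler
-- what changed: Drops A's successor dictionary with chain walking and path relabelling entirely: B keeps only a plain set of occupied rooms and scans upward from the request to the first free room.
import Mathlib
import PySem

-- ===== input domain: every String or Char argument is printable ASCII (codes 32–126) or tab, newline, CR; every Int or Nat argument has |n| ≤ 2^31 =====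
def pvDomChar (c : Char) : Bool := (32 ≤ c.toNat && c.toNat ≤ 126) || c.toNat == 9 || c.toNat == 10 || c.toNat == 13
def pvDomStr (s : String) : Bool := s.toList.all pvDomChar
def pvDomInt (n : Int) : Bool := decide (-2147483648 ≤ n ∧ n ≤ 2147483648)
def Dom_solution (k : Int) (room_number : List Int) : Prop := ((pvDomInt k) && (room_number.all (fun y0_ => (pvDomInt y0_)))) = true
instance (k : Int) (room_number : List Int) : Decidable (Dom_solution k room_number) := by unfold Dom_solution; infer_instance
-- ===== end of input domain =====

-- B drops A's successor dictionary (chain walk + path relabelling) entirely and keeps only a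
-- plain set of occupied rooms, scanning upward from each request to the first free room
-- (objective: simpler; not claimed faster).

-- ===== PORT A =====
-- the 'while j in m: b.append(j); j = m[j]' loop (fuel makes the recursion total;
-- m.size + 1 steps always suffice on the dicts A builds)
def walkA (m : PySem.Dict Int Int) : Nat → Int → List Int → List Int × Int
  | 0, j, b => (b, j)
  | fuel + 1, j, b =>
    match m.get? j with
    | none => (b, j)
    | some v => walkA m fuel v (b ++ [j])

def stepA (st : List Int × PySem.Dict Int Int) (i : Int) : List Int × PySem.Dict Int Int :=
  match st.2.get? i with
  | none => (st.1 ++ [i], st.2.insert i (i + 1))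
  | some j0 =>
    let bj := walkA st.2 (st.2.size + 1) j0 []
    let m' := bj.1.foldl (fun mm bb => mm.insert bb (bj.2 + 1)) st.2
    (st.1 ++ [bj.2], m'.insert bj.2 (bj.2 + 1))

def solution (k : Int) (room_number : List Int) : List Int :=
  (room_number.foldl stepA ([], PySem.Dict.empty)).1

-- ===== PORT B =====
-- 'room = r; while room in occupied: room += 1' (fuel totalises the while loop;
-- occupied.length + 1 steps always suffice since the occupied rooms are finite)
def scanB (occ : PySem.Set Int) : Nat → Int → Int
  | 0, x => x
  | fuel + 1, x =>
    if PySem.Set.contains occ x then scanB occ fuel (x + 1) else x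

def stepB (st : List Int × PySem.Set Int) (r : Int) : List Int × PySem.Set Int :=
  let room := scanB st.2 (st.2.length + 1) r
  (st.1 ++ [room], PySem.Set.add st.2 room)

def solution_alt (k : Int) (room_number : List Int) : List Int :=
  (room_number.foldl stepB ([], PySem.Set.empty)).1

-- ===== PRECONDITION & SPEC =====
def Spec_solution (k : Int) (room_number : List Int) (out : List Int) : Prop := out = solution_alt k room_number
instance (k : Int) (room_number : List Int) (out : List Int) : Decidable (Spec_solution k room_number out) := by unfold Spec_solution; infer_instance

-- ===== CLAIM (what is proved, stated in full; the proofs are below) =====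
def Claim_equal_solution : Prop := ∀ (k : Int) (room_number : List Int), Dom_solution k room_number → Spec_solution k room_number (solution k room_number)

-- ===== LEMMAS AND PROOFS =====

-- 'lf S x' = least integer ≥ x not in S (the mathematical value both programs compute per guest)
lemma le_foldr_max_map {α : Type} (f : α → Nat) : ∀ (l : List α) (a : α), a ∈ l → f a ≤ (l.map f).foldr max 0
  | b :: t, a, h => by
    rcases List.mem_cons.mp h with h | h
    · subst h; simp
    · have := le_foldr_max_map f t a h
      simp; omega

lemma lf_exists (S : List Int) (x : Int) : ∃ n : Nat, (x + (n:Int)) ∉ S := by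
  refine ⟨(S.map (fun y => (y - x).toNat + 1)).foldr max 0, fun hmem => ?_⟩
  have := le_foldr_max_map (fun y => (y - x).toNat + 1) S _ hmem
  simp only at this
  omega

noncomputable def lf (S : List Int) (x : Int) : Int := x + (Nat.find (lf_exists S x) : Int)

lemma lf_not_mem (S : List Int) (x : Int) : lf S x ∉ S := Nat.find_spec (lf_exists S x)

lemma lf_ge (S : List Int) (x : Int) : x ≤ lf S x := by unfold lf; omega

lemma mem_of_lt_lf {S : List Int} {x y : Int} (h1 : x ≤ y) (h2 : y < lf S x) : y ∈ S := by
  have h := Nat.find_min (lf_exists S x) (m := (y - x).toNat) (by unfold lf at h2; omega)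
  have e : x + (((y - x).toNat : Nat) : Int) = y := by omega
  rw [e] at h
  exact not_not.mp h

lemma lf_le_of_not_mem {S : List Int} {x z : Int} (h1 : x ≤ z) (h2 : z ∉ S) : lf S x ≤ z := by
  by_contra h
  exact h2 (mem_of_lt_lf h1 (by omega))

lemma lf_eq_of_not_mem {S : List Int} {x : Int} (h : x ∉ S) : lf S x = x :=
  le_antisymm (lf_le_of_not_mem le_rfl h) (lf_ge S x)

lemma lf_gt_of_mem {S : List Int} {x : Int} (h : x ∈ S) : x < lf S x := by
  have := lf_ge S x
  rcases lt_or_eq_of_le this with h' | h'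
  · exact h'
  · exact absurd h (h' ▸ lf_not_mem S x)

lemma lf_congr {S T : List Int} (h : ∀ y, y ∈ S ↔ y ∈ T) (x : Int) : lf S x = lf T x := by
  apply le_antisymm
  · exact lf_le_of_not_mem (lf_ge T x) (fun hm => lf_not_mem T x ((h _).mp hm))
  · exact lf_le_of_not_mem (lf_ge S x) (fun hm => lf_not_mem S x ((h _).mpr hm))

lemma lf_jump {S : List Int} {x v : Int} (hxv : x < v) (hgap : ∀ y, x ≤ y → y < v → y ∈ S) :
    lf S x = lf S v := by
  apply le_antisymm
  · exact lf_le_of_not_mem (le_trans (le_of_lt hxv) (lf_ge S v)) (lf_not_mem S v)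
  · refine lf_le_of_not_mem ?_ (lf_not_mem S x)
    by_contra h
    exact lf_not_mem S x (hgap _ (lf_ge S x) (by omega))

lemma lf_dist_le_length {S : List Int} (x : Int) : (lf S x - x).toNat ≤ S.length := by
  have hsub : Finset.Ico x (lf S x) ⊆ S.toFinset := by
    intro y hy
    rw [Finset.mem_Ico] at hy
    exact List.mem_toFinset.mpr (mem_of_lt_lf hy.1 hy.2)
  have := Finset.card_le_card hsub
  rw [Int.card_Ico] at this
  have := List.toFinset_card_le S
  omega

-- ===== A-side invariant and loop characterisation =====

def InvP (d : PySem.Dict Int Int) (T : Int → Prop) : Prop :=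
  ∀ p ∈ d.items, p.1 < p.2 ∧ ∀ y, p.1 < y → y < p.2 → T y

def DInv (d : PySem.Dict Int Int) : Prop := InvP d (fun y => y ∈ d.keys)

lemma InvP_mono {d : PySem.Dict Int Int} {T T' : Int → Prop} (h : InvP d T)
    (hT : ∀ y, T y → T' y) : InvP d T' :=
  fun p hp => ⟨(h p hp).1, fun y h1 h2 => hT y ((h p hp).2 y h1 h2)⟩

lemma InvP_insert {d : PySem.Dict Int Int} {T : Int → Prop} {k v : Int} (h : InvP d T)
    (hk : k < v) (hg : ∀ y, k < y → y < v → T y) : InvP (d.insert k v) T := by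
  intro p hp
  rcases (PySem.Dict.mem_items_insert d k v p).mp hp with h' | h'
  · subst h'; exact ⟨hk, hg⟩
  · exact h p h'.1

lemma keys_length_eq_size (d : PySem.Dict Int Int) : d.keys.length = d.size := by
  simp [PySem.Dict.keys, PySem.Dict.size]

lemma mem_keys_of_get?_eq_some {d : PySem.Dict Int Int} {x v : Int} (h : d.get? x = some v) :
    x ∈ d.keys :=
  PySem.Dict.mem_keys_of_mem_items d (PySem.Dict.mem_items_of_get?_eq_some d h)

-- an entry (x, v) of an invariant dict: x < v, and everything strictly between is a key
lemma entry_facts {d : PySem.Dict Int Int} {x v : Int} (hinv : DInv d)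
    (h : d.get? x = some v) : x < v ∧ ∀ y, x < y → y < v → y ∈ d.keys :=
  hinv (x, v) (PySem.Dict.mem_items_of_get?_eq_some d h)

-- one chain hop keeps lf and shrinks the distance to it
lemma hop_facts {d : PySem.Dict Int Int} {x v : Int} (hinv : DInv d)
    (h : d.get? x = some v) :
    lf d.keys v = lf d.keys x ∧ x < v ∧ v ≤ lf d.keys x := by
  obtain ⟨hlt, hgap⟩ := entry_facts hinv h
  have hxk : x ∈ d.keys := mem_keys_of_get?_eq_some h
  have hjump : lf d.keys x = lf d.keys v := by
    apply lf_jump hlt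
    intro y h1 h2
    rcases eq_or_lt_of_le h1 with h1 | h1
    · exact h1 ▸ hxk
    · exact hgap y h1 h2
  have hvle : v ≤ lf d.keys x := by
    by_contra hc
    exact lf_not_mem d.keys x (hgap _ (lf_gt_of_mem hxk) (by omega))
  exact ⟨hjump.symm, hlt, hvle⟩

lemma walkA_spec (m : PySem.Dict Int Int) (hinv : DInv m) :
    ∀ (fuel : Nat) (x : Int) (acc : List Int), (lf m.keys x - x).toNat < fuel →
    (walkA m fuel x acc).2 = lf m.keys x ∧
    ∀ bb ∈ (walkA m fuel x acc).1, bb ∈ acc ∨ (x ≤ bb ∧ bb < lf m.keys x ∧ bb ∈ m.keys) := by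
  intro fuel
  induction fuel with
  | zero => intro x acc h; omega
  | succ f ih =>
    intro x acc h
    rcases hx : m.get? x with _ | v
    · have hxk : x ∉ m.keys := (PySem.Dict.get?_eq_none_iff_not_mem_keys m x).mp hx
      simp [walkA, hx, lf_eq_of_not_mem hxk]
      exact fun bb hbb => Or.inl hbb
    · obtain ⟨hlf, hxv, hvle⟩ := hop_facts hinv hx
      have hxk : x ∈ m.keys := mem_keys_of_get?_eq_some hx
      have hxlf : x < lf m.keys x := lf_gt_of_mem hxk
      have hdist : (lf m.keys v - v).toNat < f := by
        have := lf_ge m.keys v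
        rw [hlf] at *
        omega
      obtain ⟨ihs, ihf⟩ := ih v (acc ++ [x]) hdist
      have heq : walkA m (f + 1) x acc = walkA m f v (acc ++ [x]) := by simp [walkA, hx]
      rw [heq, ihs, hlf]
      refine ⟨rfl, fun bb hbb => ?_⟩
      rcases ihf bb hbb with hin | ⟨h1, h2, h3⟩
      · rcases List.mem_append.mp hin with hin | hin
        · exact Or.inl hin
        · right
          rw [List.mem_singleton.mp hin]
          exact ⟨le_rfl, hxlf, hxk⟩
      · exact Or.inr ⟨by omega, by rw [hlf] at h2; exact h2, h3⟩

lemma InvP_foldl_insert {T : Int → Prop} {c : Int} :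
    ∀ (b : List Int) (m : PySem.Dict Int Int), InvP m T →
    (∀ bb ∈ b, bb < c ∧ ∀ y, bb < y → y < c → T y) →
    InvP (b.foldl (fun mm bb => mm.insert bb c) m) T := by
  intro b
  induction b with
  | nil => intro m h _; exact h
  | cons bb t ih =>
    intro m h hb
    simp only [List.foldl_cons]
    exact ih _ (InvP_insert h (hb bb (by simp)).1 (hb bb (by simp)).2)
      (fun x hx => hb x (by simp [hx]))

lemma mem_keys_foldl_insert_const {c : Int} (b : List Int) (m : PySem.Dict Int Int) (y : Int) :
    y ∈ (b.foldl (fun mm bb => mm.insert bb c) m).keys ↔ y ∈ m.keys ∨ y ∈ b := by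
  have h := PySem.Dict.keys_foldl_insert b (fun _ _ => c) m
  simp only at h
  rw [h, PySem.Set.mem_update]

lemma stepA_spec (ans : List Int) (m : PySem.Dict Int Int) (i : Int)
    (hnd : m.keys.Nodup) (hinv : DInv m) :
    (stepA (ans, m) i).1 = ans ++ [lf m.keys i] ∧
    (∀ y, y ∈ (stepA (ans, m) i).2.keys ↔ (y ∈ m.keys ∨ y = lf m.keys i)) ∧
    (stepA (ans, m) i).2.keys.Nodup ∧ DInv (stepA (ans, m) i).2 := by
  rcases hx : m.get? i with _ | j0
  · have hik : i ∉ m.keys := (PySem.Dict.get?_eq_none_iff_not_mem_keys m i).mp hx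
    have hlfi : lf m.keys i = i := lf_eq_of_not_mem hik
    simp only [stepA, hx, hlfi]
    refine ⟨trivial, ?_, PySem.Dict.nodup_keys_insert _ _ _ hnd, ?_⟩
    · intro y
      rw [PySem.Dict.mem_keys_insert]
      tauto
    · apply InvP_insert (v := i + 1)
      · apply InvP_mono hinv
        intro y hy
        rw [PySem.Dict.mem_keys_insert]
        exact Or.inr hy
      · omega
      · intro y h1 h2; omega
  · obtain ⟨hlf, hij, hjle⟩ := hop_facts hinv hx
    have hfuel : (lf m.keys j0 - j0).toNat < m.size + 1 := by
      have h1 := lf_dist_le_length (S := m.keys) j0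
      have h2 := keys_length_eq_size m
      omega
    obtain ⟨hsnd, hfst⟩ := walkA_spec m hinv (m.size + 1) j0 [] hfuel
    simp only [stepA, hx]
    set bj := walkA m (m.size + 1) j0 [] with hbj
    have hj : bj.2 = lf m.keys i := by rw [hsnd, hlf]
    have hb : ∀ bb ∈ bj.1, j0 ≤ bb ∧ bb < lf m.keys i ∧ bb ∈ m.keys := by
      intro bb hbb
      rcases hfst bb hbb with h | ⟨h1, h2, h3⟩
      · simp at h
      · exact ⟨h1, by rw [← hlf]; exact h2, h3⟩
    rw [hj]
    set j := lf m.keys i with hjdef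
    refine ⟨rfl, ?_, ?_, ?_⟩
    · intro y
      rw [PySem.Dict.mem_keys_insert, mem_keys_foldl_insert_const]
      constructor
      · rintro (h | h | h)
        · exact Or.inr h
        · exact Or.inl h
        · exact Or.inl (hb y h).2.2
      · rintro (h | h)
        · exact Or.inr (Or.inl h)
        · exact Or.inl h
    · exact PySem.Dict.nodup_keys_insert _ _ _
        (PySem.Dict.nodup_keys_foldl_insert bj.1 (fun _ _ => j + 1) m hnd)
    · have hT0 : InvP ((bj.1.foldl (fun mm bb => mm.insert bb (j + 1)) m).insert j (j + 1))
          (fun y => y ∈ m.keys ∨ y = j) := by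
        apply InvP_insert (k := j) (v := j + 1)
        · apply InvP_foldl_insert _ _ (InvP_mono hinv (fun y hy => Or.inl hy))
          intro bb hbb
          obtain ⟨h1, h2, h3⟩ := hb bb hbb
          refine ⟨by omega, fun y hy1 hy2 => ?_⟩
          rcases eq_or_lt_of_le (show y ≤ j by omega) with he | hlt
          · exact Or.inr he
          · exact Or.inl (mem_of_lt_lf (x := j0) (by omega) (by rw [hlf]; exact hlt))
        · omega
        · intro y h1 h2; omega
      apply InvP_mono hT0
      intro y hy
      rw [PySem.Dict.mem_keys_insert, mem_keys_foldl_insert_const]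
      tauto

-- ===== B-side characterisation =====

lemma scanB_spec (occ : PySem.Set Int) :
    ∀ (fuel : Nat) (x : Int), (lf occ x - x).toNat < fuel →
    scanB occ fuel x = lf occ x := by
  intro fuel
  induction fuel with
  | zero => intro x h; omega
  | succ f ih =>
    intro x h
    by_cases hx : x ∈ occ
    · have hjump : lf occ x = lf occ (x + 1) := by
        apply lf_jump (by omega)
        intro y h1 h2
        have : y = x := by omega
        exact this ▸ hx
      have hgt : x < lf occ x := lf_gt_of_mem hx
      have hc : PySem.Set.contains occ x = true := (PySem.Set.contains_iff occ x).mpr hx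
      have hdist : (lf occ (x + 1) - (x + 1)).toNat < f := by
        rw [← hjump]; omega
      simp only [scanB, hc, if_pos]
      rw [ih (x + 1) hdist, hjump]
    · simp [scanB, hx, lf_eq_of_not_mem hx]

lemma stepB_spec (ans : List Int) (occ : PySem.Set Int) (r : Int) :
    (stepB (ans, occ) r).1 = ans ++ [lf occ r] ∧
    (∀ y, y ∈ (stepB (ans, occ) r).2 ↔ (y ∈ occ ∨ y = lf occ r)) := by
  have hfuel : (lf occ r - r).toNat < occ.length + 1 := by
    have := lf_dist_le_length (S := occ) r
    omega
  have hroom : scanB occ (occ.length + 1) r = lf occ r := scanB_spec occ _ r hfuel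
  simp only [stepB, hroom]
  exact ⟨trivial, fun y => PySem.Set.mem_add occ (lf occ r) y⟩

-- ===== the two loops agree =====

lemma main_loop : ∀ (rn : List Int) (stA : List Int × PySem.Dict Int Int)
    (stB : List Int × PySem.Set Int),
    stA.1 = stB.1 → stA.2.keys.Nodup → DInv stA.2 →
    (∀ y, y ∈ stA.2.keys ↔ y ∈ stB.2) →
    (rn.foldl stepA stA).1 = (rn.foldl stepB stB).1 := by
  intro rn
  induction rn with
  | nil => intro stA stB h _ _ _; exact h
  | cons r t ih =>
    intro stA stB hfst hndA hinvA hmem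
    obtain ⟨a1, a2, a3, a4⟩ := stepA_spec stA.1 stA.2 r hndA hinvA
    obtain ⟨b1, b2⟩ := stepB_spec stB.1 stB.2 r
    have hlf : lf stA.2.keys r = lf stB.2 r := lf_congr hmem r
    simp only [List.foldl_cons]
    apply ih
    · rw [show stepA stA r = stepA (stA.1, stA.2) r from rfl,
         show stepB stB r = stepB (stB.1, stB.2) r from rfl, a1, b1, hfst, hlf]
    · exact a3
    · exact a4
    · intro y
      rw [show stepA stA r = stepA (stA.1, stA.2) r from rfl,
         show stepB stB r = stepB (stB.1, stB.2) r from rfl] at *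
      rw [a2 y, b2 y, hmem y, hlf]

lemma empty_items : (PySem.Dict.empty : PySem.Dict Int Int).items = [] := by
  have h := PySem.Dict.keys_empty (κ := Int) (ν := Int)
  simpa [PySem.Dict.keys] using h

lemma solution_eq_alt (k : Int) (room_number : List Int) :
    solution k room_number = solution_alt k room_number := by
  unfold solution solution_alt
  apply main_loop
  · rfl
  · exact PySem.Dict.nodup_keys_empty
  · intro p hp; rw [empty_items] at hp; cases hp
  · intro y
    constructor
    · intro hy; rw [PySem.Dict.keys_empty] at hy; cases hy
    · intro hy; cases hy

-- ===== VERDICT (by name: the statement is the Claim_ definition above) =====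
theorem solution_spec : Claim_equal_solution := by
  intro k room_number _
  unfold Spec_solution
  exact solution_eq_alt k room_number
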